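-- pv_equiv track=rewrite | github.com/Abhishek-fullstack-dev/naturo | naturo/selector.py | _split_uri_path
-- ===== SOURCE A (Python) =====
-- def _split_uri_path(body: str) -> list[str]:
--     """Split URI path on '/' while respecting bracketed attribute sections.
--
--     Args:
--         body: The URI body after "app://".
--
--     Returns:
--         List of path segments.
--     """
--     segments: list[str] = []
--     current: list[str] = []
--     depth = 0
--
--     for ch in body:
--         if ch == "[":
--             depth += 1
--             current.append(ch)
--         elif ch == "]":
--             depth -= 1
--             current.append(ch)
--         elif ch == "/" and depth == 0:
--             if current:
--                 segments.append("".join(current))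
--             current = []
--         else:
--             current.append(ch)
--
--     if current:
--         segments.append("".join(current))
--
--     return segments
-- ===== SOURCE B (Python) =====
-- def _split_uri_path(body: str) -> list[str]:
--     """Index-scan variant: find top-level '/' positions, emit non-empty slices."""
--     segments: list[str] = []
--     start = 0
--     depth = 0
--     for i, ch in enumerate(body):
--         if ch == "[":
--             depth += 1
--         elif ch == "]":
--             depth -= 1
--         elif ch == "/" and depth == 0:
--             if i > start:
--                 segments.append(body[start:i])
--             start = i + 1
--     if start < len(body):
--         segments.append(body[start:])
--     return segments
-- ===== Notes on version B (the rewrite author's own statement) =====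
-- stated objective: alternative
-- what changed: B keeps no character accumulator: it scans once tracking only bracket depth and the start index of the current segment, and emits string slices body[start:i] at each top-level '/' (and body[start:] at the end), instead of appending characters one by one and joining them.
import Mathlib
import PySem

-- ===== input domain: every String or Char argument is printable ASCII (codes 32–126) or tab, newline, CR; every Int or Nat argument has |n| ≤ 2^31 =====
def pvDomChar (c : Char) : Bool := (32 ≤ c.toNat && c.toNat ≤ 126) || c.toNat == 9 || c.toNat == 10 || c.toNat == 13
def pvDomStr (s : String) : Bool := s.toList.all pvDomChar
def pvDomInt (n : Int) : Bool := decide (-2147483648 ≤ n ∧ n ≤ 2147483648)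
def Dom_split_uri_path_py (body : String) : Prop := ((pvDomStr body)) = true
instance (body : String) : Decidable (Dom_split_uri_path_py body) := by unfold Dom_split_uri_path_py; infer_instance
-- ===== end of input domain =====

-- B replaces A's per-character accumulator with an index scan emitting slices; same O(n) cost, different bookkeeping.

-- ===== PORT A =====
-- the for-loop of A over (segments, current, depth); "".join(current) = String.ofList cur
def pvALoop : List Char → List String → List Char → Int → List String
  | [], segs, cur, _depth => if cur ≠ [] then segs ++ [String.ofList cur] else segs
  | c :: rest, segs, cur, depth =>
    if c = '[' then pvALoop rest segs (cur ++ [c]) (depth + 1)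
    else if c = ']' then pvALoop rest segs (cur ++ [c]) (depth - 1)
    else if c = '/' ∧ depth = 0 then
      pvALoop rest (if cur ≠ [] then segs ++ [String.ofList cur] else segs) [] depth
    else pvALoop rest segs (cur ++ [c]) depth

def split_uri_path_py (body : String) : List String :=
  pvALoop body.toList [] [] 0

-- ===== PORT B =====
-- B's for-loop over enumerate(body): state (segments, start, depth), i the running index;
-- body[start:i] / body[start:] ported as PySem.List.slice on the char list
def pvBLoop (body : List Char) : List Char → Int → List String → Int → Int → List String
  | [], _i, segs, start, _depth =>
      if start < (body.length : Int) then
        segs ++ [String.ofList (PySem.List.slice body (some start) none)]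
      else segs
  | c :: rest, i, segs, start, depth =>
    if c = '[' then pvBLoop body rest (i + 1) segs start (depth + 1)
    else if c = ']' then pvBLoop body rest (i + 1) segs start (depth - 1)
    else if c = '/' ∧ depth = 0 then
      pvBLoop body rest (i + 1)
        (if start < i then segs ++ [String.ofList (PySem.List.slice body (some start) (some i))] else segs)
        (i + 1) depth
    else pvBLoop body rest (i + 1) segs start depth

def split_uri_path_py_alt (body : String) : List String :=
  pvBLoop body.toList body.toList 0 [] 0 0

-- ===== PRECONDITION & SPEC =====
def Spec_split_uri_path_py (body : String) (out : List String) : Prop := out = split_uri_path_py_alt body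
instance (body : String) (out : List String) : Decidable (Spec_split_uri_path_py body out) := by unfold Spec_split_uri_path_py; infer_instance

-- ===== CLAIM (what is proved, stated in full; the proofs are below) =====
def Claim_equal_split_uri_path_py : Prop := ∀ (body : String), Dom_split_uri_path_py body → Spec_split_uri_path_py body (split_uri_path_py body)

-- ===== LEMMAS AND PROOFS =====

lemma pv_drop_append {pre rest : List Char} {n : Nat} (h : n ≤ pre.length) :
    (pre ++ rest).drop n = pre.drop n ++ rest := by
  rw [List.drop_append_of_le_length h]

lemma pv_slice_mid (pre rest : List Char) (start : Nat) (h : start ≤ pre.length) :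
    PySem.List.slice (pre ++ rest) (some (start : Int)) (some (pre.length : Int))
      = pre.drop start := by
  rw [PySem.List.slice_toNat _ (by positivity) (by positivity)]
  simp only [Int.toNat_natCast]
  rw [pv_drop_append h]
  have hl : pre.length - start = (pre.drop start).length := by simp
  rw [hl, List.take_left]

lemma pv_loop_eq (body : List Char) (rest : List Char) :
    ∀ (pre : List Char) (segs : List String) (start : Nat) (depth : Int),
      body = pre ++ rest → start ≤ pre.length →
      pvALoop rest segs (pre.drop start) depth
        = pvBLoop body rest (pre.length : Int) segs (start : Int) depth := by
  induction rest with
  | nil =>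
    intro pre segs start depth hb hs
    subst hb
    simp only [List.append_nil, pvALoop, pvBLoop]
    rw [PySem.List.slice_from _ (by positivity)]
    simp only [Int.toNat_natCast]
    by_cases h : pre.drop start = []
    · rw [if_neg (by simpa using h), if_neg (by rw [List.drop_eq_nil_iff] at h; omega)]
    · have h' : start < pre.length := by
        rw [List.drop_eq_nil_iff] at h; omega
      rw [if_pos h, if_pos (by exact_mod_cast h')]
  | cons c rs ih =>
    intro pre segs start depth hb hs
    simp only [pvALoop, pvBLoop]
    have hb' : body = (pre ++ [c]) ++ rs := by simpa using hb
    have hlen : ((pre ++ [c]).length : Int) = (pre.length : Int) + 1 := by simp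
    have hdrop : (pre ++ [c]).drop start = pre.drop start ++ [c] := pv_drop_append hs
    have hcur : pre.drop start ≠ [] ↔ start < pre.length := by
      rw [ne_eq, List.drop_eq_nil_iff]; omega
    by_cases h1 : c = '['
    · rw [if_pos h1, if_pos h1, ← hdrop, ← hlen]
      exact ih (pre ++ [c]) segs start (depth + 1) hb' (by simp; omega)
    · by_cases h2 : c = ']'
      · rw [if_neg h1, if_neg h1, if_pos h2, if_pos h2, ← hdrop, ← hlen]
        exact ih (pre ++ [c]) segs start (depth - 1) hb' (by simp; omega)
      · by_cases h3 : c = '/' ∧ depth = 0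
        · rw [if_neg h1, if_neg h1, if_neg h2, if_neg h2, if_pos h3, if_pos h3]
          -- top-level '/': A flushes cur, B records a slice; both continue with an empty segment
          have hslice : String.ofList (PySem.List.slice body (some (start : Int)) (some (pre.length : Int)))
              = String.ofList (pre.drop start) := by
            rw [hb, pv_slice_mid pre (c :: rs) start hs]
          have hkey : ∀ segs' : List String,
              pvALoop rs segs' [] depth
                = pvBLoop body rs ((pre.length : Int) + 1) segs' ((pre.length : Int) + 1) depth := by
            intro segs'
            have := ih (pre ++ [c]) segs' (pre.length + 1) depth hb' (by simp)
            have hdrop' : (pre ++ [c]).drop (pre.length + 1) = [] := by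
              rw [List.drop_eq_nil_iff]; simp
            rw [hdrop'] at this
            rw [hlen] at this
            have hcast : ((pre.length + 1 : Nat) : Int) = (pre.length : Int) + 1 := by push_cast; ring
            rw [hcast] at this
            exact this
          by_cases h : pre.drop start = []
          · rw [if_neg (by simpa using h),
                if_neg (show ¬ ((start : Int) < (pre.length : Int)) by
                  rw [List.drop_eq_nil_iff] at h; omega)]
            exact hkey segs
          · rw [if_pos h, if_pos (show (start : Int) < (pre.length : Int) by
                  exact_mod_cast hcur.mp h), hslice]
            exact hkey (segs ++ [String.ofList (pre.drop start)])
        · rw [if_neg h1, if_neg h1, if_neg h2, if_neg h2, if_neg h3, if_neg h3, ← hdrop, ← hlen]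
          exact ih (pre ++ [c]) segs start depth hb' (by simp; omega)

-- ===== VERDICT (by name: the statement is the Claim_ definition above) =====
theorem split_uri_path_py_spec : Claim_equal_split_uri_path_py := by
  intro body _
  unfold Spec_split_uri_path_py split_uri_path_py split_uri_path_py_alt
  simpa using pv_loop_eq body.toList body.toList [] [] 0 0 (by simp) (by simp)
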